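-- pv_equiv track=rewrite | github.com/bair5249/PL_TestTasks | task1/task1.py | circle_array
-- ===== SOURCE A (Python) =====
-- def circle_array(n, m):
--     count_lst = []
--     s = []
--     lst = "1"
--     i = 1
--     while True:
--         i += 1
--         lst += str(i)
--         if len(lst) % m == 0:
--             count_lst.append(lst)
--             lst = str(i)
--         if i == n:
--             i = 0
--         if len(count_lst) >= 2 and count_lst[0][0] == count_lst[-1][-1]:
--             break
--     for i in count_lst:
--         s.append(i[0])
--     return s
-- ===== SOURCE B (Python) =====
-- def circle_array(n, m):
--     # Two-phase: collect the chunk-completing NUMBERS (one helper call per chunk),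
--     # then derive the answer afterwards as '1' plus the first digit of each
--     # boundary number except the last.
--     def next_boundary(i, L):
--         # advance the cyclic counter from i until the running digit-length L
--         # becomes a multiple of m; return the completing number, its digit
--         # count and the counter after it
--         while True:
--             i += 1
--             c = i
--             d = len(str(c))
--             L += d
--             if c == n:
--                 i = 0
--             if L % m == 0:
--                 return c, d, i
--
--     bounds = []
--     i, L = 1, 1
--     while len(bounds) < 2 or not str(bounds[-1]).endswith('1'):
--         c, d, i = next_boundary(i, L)
--         bounds.append(c)
--         L = d
--     return ['1'] + [str(c)[0] for c in bounds[:-1]]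
-- ===== Notes on version B (the rewrite author's own statement) =====
-- stated objective: alternative
-- what changed: B never builds or stores chunk strings: a per-chunk helper advances the cyclic counter to the next completion and returns the boundary NUMBER, the outer loop collects these integers and stops when the latest boundary number ends in '1', and a separate final pass derives the answer as '1' plus the first digit of every boundary but the last; Pre_ excludes only m = 0, where A raises ZeroDivisionError.
import Mathlib
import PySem

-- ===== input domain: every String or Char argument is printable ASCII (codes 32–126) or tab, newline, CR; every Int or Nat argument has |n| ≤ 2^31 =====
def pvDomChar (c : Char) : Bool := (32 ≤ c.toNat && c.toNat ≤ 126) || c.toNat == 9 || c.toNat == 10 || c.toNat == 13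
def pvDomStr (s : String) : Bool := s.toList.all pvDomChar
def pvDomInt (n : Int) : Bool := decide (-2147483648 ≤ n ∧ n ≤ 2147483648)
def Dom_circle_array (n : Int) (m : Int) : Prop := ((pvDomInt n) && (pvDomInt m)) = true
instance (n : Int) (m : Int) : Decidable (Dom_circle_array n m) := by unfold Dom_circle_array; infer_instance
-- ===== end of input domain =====

-- B restructures A: a per-chunk helper returns the chunk-completing NUMBERS (no chunk strings
-- are ever built or stored), the outer loop collects those integers and stops when the latest
-- boundary number's decimal form ends in '1', and a separate final pass derives the answer as
-- '1' plus the first digit of every boundary but the last (objective: alternative algorithmic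
-- decomposition; no speed claim).
-- Both ports run their unbounded Python loops on the same generous fuel counter: the fuel only
-- makes the recursion total in Lean; it plays no role in the equivalence proof.

-- fuel for the unbounded loops (totality guard only, identical for both ports)
def pvFuel (n : Int) (m : Int) : Nat := 200000 * (n.natAbs + m.natAbs) + 100000000

-- ===== PORT A =====
-- chunk strings are carried as `List Char` (the PySem representation of str). The growing
-- string `lst` is stored REVERSED together with its length so that Python's amortised-cheap
-- `lst += str(i)` stays cheap (`lstR` holds exactly `lst` reversed, `lstLen` its length);
-- the chunks appended to `count_lst` are the same forward strings A stores.
-- Each chunk appended to `count_lst` is kept as the PAIR (chunk, chunk reversed): the same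
-- forward string A stores, plus its reversal so that both `i[0]` (head of .1) and
-- `count_lst[-1][-1]` (head of .2) are O(1), as they are on Python's str.
-- `headD` ports Python's s[0] / s[-1] (the `' '` defaults are never reached: every string
-- indexed in the loop is nonempty). `len(lst) % m` is PySem.Int.mod:
-- m = 0 is Python's ZeroDivisionError, excluded by Pre_ and guarded at the wrapper.
def circleLoopA (n : Int) (m : Int) : Nat → List (List Char × List Char) → List Char → Int → Int → List String
  | 0, count_lst, _, _, _ => count_lst.map (fun c => String.ofList [c.1.headD ' '])
  | fuel+1, count_lst, lstR, lstLen, i =>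
      let i1 := i + 1
      let s := PySem.Int.toChars i1
      let lstR1 := s.reverse ++ lstR
      let len1 := lstLen + (s.length : Int)
      let st :=
        if PySem.Int.mod len1 m = 0 then
          (count_lst ++ [(lstR1.reverse, lstR1)], s.reverse, (s.length : Int))
        else (count_lst, lstR1, len1)
      let i2 := if i1 = n then 0 else i1
      if 2 ≤ st.1.length ∧ (st.1.headD ([], [])).1.headD ' ' = (st.1.getLast?.getD ([], [])).2.headD ' ' then
        st.1.map (fun c => String.ofList [c.1.headD ' '])   -- `for i in count_lst: s.append(i[0])`
      else
        circleLoopA n m fuel st.1 st.2.1 st.2.2 i2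

def circle_array (n : Int) (m : Int) : List String :=
  -- m = 0 is Python's ZeroDivisionError at the first `len(lst) % m` (outside Pre_);
  -- the guard only keeps the fuelled loop off that junk case
  if m = 0 then [] else circleLoopA n m (pvFuel n m) [] ['1'] 1 1

-- ===== PORT B =====
-- `['1'] + [str(c)[0] for c in bounds[:-1]]` (`bounds[:-1]` is dropLast; str(c) is never
-- empty, so str(c)[0] is its head)
def pvFinishB (bounds : List Int) : List String :=
  "1" :: bounds.dropLast.map (fun c => String.ofList [(PySem.Int.toChars c).headD ' '])

-- fuel-exhaustion value of the outer loop (unreachable for the fuel used; chosen as the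
-- first digits collected so far so that both fuelled ports agree at every fuel)
def pvSoFarB (bounds : List Int) : List String :=
  if bounds.isEmpty then [] else pvFinishB bounds

-- `next_boundary(i, L)`: advance the cyclic counter until L is a multiple of m; returns the
-- completing number, its digit count, the counter after it — plus the remaining fuel
def nextBoundaryB (n : Int) (m : Int) : Nat → Int → Int → Option (Int × Int × Int × Nat)
  | 0, _, _ => none
  | fuel+1, i, L =>
      let c := i + 1
      let d : Int := ((PySem.Int.toChars c).length : Int)
      let L1 := L + d
      let i2 := if c = n then 0 else c
      if PySem.Int.mod L1 m = 0 then some (c, d, i2, fuel)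
      else nextBoundaryB n m fuel i2 L1

theorem nextBoundaryB_fuel_lt {n m : Int} : ∀ {fuel : Nat} {i L c d i2 : Int} {f' : Nat},
    nextBoundaryB n m fuel i L = some (c, d, i2, f') → f' < fuel := by
  intro fuel
  induction fuel with
  | zero => intro i L c d i2 f' h; simp [nextBoundaryB] at h
  | succ f ih =>
    intro i L c d i2 f' h
    simp only [nextBoundaryB] at h
    split at h
    · rcases h with ⟨rfl, rfl, rfl, rfl⟩ |-
      simp_all
    · exact Nat.lt_succ_of_lt (ih h)

-- outer loop of B: collect boundary numbers until the latest one ends in the digit 1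
def circleOuterB (n : Int) (m : Int) (fuel : Nat) (bounds : List Int) (L : Int) (i : Int) : List String :=
  if 2 ≤ bounds.length ∧ PySem.Str.endswith (PySem.Int.toStr (bounds.getLastD 0)) "1" = true then
    pvFinishB bounds
  else
    match h : nextBoundaryB n m fuel i L with
    | none => pvSoFarB bounds
    | some (c, d, i2, f') => circleOuterB n m f' (bounds ++ [c]) d i2
termination_by fuel
decreasing_by exact nextBoundaryB_fuel_lt h

def circle_array_alt (n : Int) (m : Int) : List String :=
  -- m = 0 is Python's ZeroDivisionError at the first `L % m` (outside Pre_)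
  if m = 0 then [] else circleOuterB n m (pvFuel n m) [] 1 1

-- ===== PRECONDITION & SPEC =====
-- Pre_ excludes only m = 0, on which Python A raises ZeroDivisionError at `len(lst) % m`.
def Pre_circle_array (n : Int) (m : Int) : Prop := m ≠ 0
instance (n : Int) (m : Int) : Decidable (Pre_circle_array n m) := by unfold Pre_circle_array; infer_instance
def pvWitness_circle_array : Int × Int := (5, 3)
def Spec_circle_array (n : Int) (m : Int) (out : List String) : Prop := out = circle_array_alt n m
instance (n : Int) (m : Int) (out : List String) : Decidable (Spec_circle_array n m out) := by unfold Spec_circle_array; infer_instance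

-- ===== CLAIM (what is proved, stated in full; the proofs are below) =====
def Claim_equal_circle_array : Prop := ∀ (n : Int) (m : Int), Dom_circle_array n m → Pre_circle_array n m → Spec_circle_array n m (circle_array n m)

-- ===== LEMMAS AND PROOFS =====

theorem pvToChars_ne_nil (k : Int) : PySem.Int.toChars k ≠ [] := by
  simp only [PySem.Int.toChars]
  split
  · simp
  · intro h
    have := Nat.length_toDigits_pos (b := 10) (n := k.toNat)
    simp [h] at this

theorem pvOfList_singleton_inj (a b : Char) : String.ofList [a] = String.ofList [b] ↔ a = b := by
  constructor
  · intro h; have := congrArg String.toList h; simpa using this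
  · intro h; rw [h]

-- A's break condition and B's stop condition
def pvBreakA (cl : List (List Char × List Char)) : Prop :=
  2 ≤ cl.length ∧ (cl.headD ([], [])).1.headD ' ' = (cl.getLast?.getD ([], [])).2.headD ' ' 

-- first digit of the current chunk, read off B's integer state
def pvCurFirst (bounds : List Int) : Char :=
  match bounds.getLast? with
  | none => '1'
  | some b => (PySem.Int.toChars b).headD ' '

-- the simulation relation between A's state (count_lst, lstR) and B's state (bounds):
-- A's running length and B's L are both carried as (lstR.length : Int) in the main lemma
def pvRel (cl : List (List Char × List Char)) (lstR : List Char) (bounds : List Int) : Prop :=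
  lstR ≠ [] ∧
  cl.map (fun c => String.ofList [c.1.headD ' ']) = pvSoFarB bounds ∧
  cl.getLast?.map (fun c => c.2.headD ' ') = bounds.getLast?.map (fun b => (PySem.Int.toChars b).getLastD ' ') ∧
  lstR.getLastD ' ' = pvCurFirst bounds

theorem pvSuffix_singleton_iff (c : Char) (cs : List Char) : [c] <:+ cs ↔ cs.getLast? = some c := by
  constructor
  · rintro ⟨t, rfl⟩; simp
  · intro h; exact ⟨cs.dropLast, List.dropLast_append_getLast? c h⟩

theorem pvEndswith_iff (b : Int) :
    PySem.Str.endswith (PySem.Int.toStr b) "1" = true ↔ (PySem.Int.toChars b).getLastD ' ' = '1' := by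
  rw [PySem.Str.endswith_eq, PySem.Chars.endswith_iff, PySem.Int.toList_toStr]
  have hne := pvToChars_ne_nil b
  rw [show ("1" : String).toList = ['1'] from rfl, pvSuffix_singleton_iff]
  rw [List.getLastD_eq_getLast?]
  cases h : (PySem.Int.toChars b).getLast? with
  | none => simp [List.getLast?_eq_none_iff] at h; exact absurd h hne
  | some x => simp

theorem pvLen_bounds (cl : List (List Char × List Char)) (bounds : List Int)
    (hf : cl.map (fun c => String.ofList [c.1.headD ' ']) = pvSoFarB bounds) :
    cl.length = bounds.length := by
  have := congrArg List.length hf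
  simp only [List.length_map] at this
  rw [this]
  cases bounds with
  | nil => simp [pvSoFarB]
  | cons b bs => simp [pvSoFarB, pvFinishB]

theorem pvStop_iff (cl : List (List Char × List Char)) (bounds : List Int)
    (hf : cl.map (fun c => String.ofList [c.1.headD ' ']) = pvSoFarB bounds)
    (hl : cl.getLast?.map (fun c => c.2.headD ' ') = bounds.getLast?.map (fun b => (PySem.Int.toChars b).getLastD ' ')) :
    pvBreakA cl ↔ (2 ≤ bounds.length ∧ PySem.Str.endswith (PySem.Int.toStr (bounds.getLastD 0)) "1" = true) := by
  have hlen := pvLen_bounds cl bounds hf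
  unfold pvBreakA
  rw [hlen]
  by_cases h2 : 2 ≤ bounds.length
  · simp only [h2, true_and]
    -- bounds and cl are nonempty
    cases bounds with
    | nil => simp at h2
    | cons b0 bs =>
      cases cl with
      | nil => simp at hlen
      | cons c0 ct =>
        -- head of cl's firsts is "1"
        have hh : String.ofList [c0.1.headD ' '] = "1" := by
          have := congrArg List.head? hf
          simpa [pvSoFarB, pvFinishB] using this
        have hc0 : c0.1.headD ' ' = '1' := by
          rw [show ("1" : String) = String.ofList ['1'] from rfl] at hh
          exact (pvOfList_singleton_inj _ _).mp hh
        -- last chars agree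
        have hglc : (c0 :: ct).getLast? = some ((c0 :: ct).getLast (by simp)) :=
          List.getLast?_eq_some_getLast _
        have hglb : (b0 :: bs).getLast? = some ((b0 :: bs).getLast (by simp)) :=
          List.getLast?_eq_some_getLast _
        rw [hglc, hglb] at hl
        simp only [Option.map_some, Option.some.injEq] at hl
        rw [pvEndswith_iff]
        have hgd : (b0 :: bs).getLastD 0 = (b0 :: bs).getLast (by simp) := by
          rw [List.getLastD_eq_getLast?, hglb]; rfl
        rw [hgd]
        simp only [List.headD_cons, hc0, hglc, Option.getD_some, hl]
        exact eq_comm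
  · simp [h2]

-- one-step equation for the outer loop (unfolds the well-founded recursion)
theorem circleOuterB_eq (n m : Int) (fuel : Nat) (bounds : List Int) (L i : Int) :
    circleOuterB n m fuel bounds L i =
      if 2 ≤ bounds.length ∧ PySem.Str.endswith (PySem.Int.toStr (bounds.getLastD 0)) "1" = true then
        pvFinishB bounds
      else
        match nextBoundaryB n m fuel i L with
        | none => pvSoFarB bounds
        | some (c, d, i2, f') => circleOuterB n m f' (bounds ++ [c]) d i2 := by
  rw [circleOuterB]
  split
  · rfl
  · split <;> rename_i h <;> rw [h]

-- one inner step of B when no chunk completes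
theorem nextBoundaryB_step (n m : Int) (fuel : Nat) (i L : Int)
    (hr : ¬ PySem.Int.mod (L + ((PySem.Int.toChars (i + 1)).length : Int)) m = 0) :
    nextBoundaryB n m (fuel + 1) i L
      = nextBoundaryB n m fuel (if i + 1 = n then 0 else i + 1)
          (L + ((PySem.Int.toChars (i + 1)).length : Int)) := by
  simp only [nextBoundaryB]
  rw [if_neg hr]

-- appending a boundary extends the collected first digits by the current chunk's first digit
theorem pvSoFar_snoc (l : List Int) (x : Int) :
    pvSoFarB l ++ [String.ofList [pvCurFirst l]] = pvSoFarB (l ++ [x]) := by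
  have h1 : pvSoFarB (l ++ [x])
      = "1" :: l.map (fun c => String.ofList [(PySem.Int.toChars c).headD ' ']) := by
    simp [pvSoFarB, pvFinishB]
  rcases l.eq_nil_or_concat with rfl | ⟨t, b, rfl⟩
  · simp [pvSoFarB, pvCurFirst]
    rfl
  · simp only [List.concat_eq_append] at h1 ⊢
    have h2 : pvSoFarB (t ++ [b])
        = "1" :: t.map (fun c => String.ofList [(PySem.Int.toChars c).headD ' ']) := by
      simp [pvSoFarB, pvFinishB]
    have h3 : pvCurFirst (t ++ [b]) = (PySem.Int.toChars b).headD ' ' := by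
      simp [pvCurFirst]
    rw [h1, h2, h3]
    simp

-- MAIN LEMMA: the simulation
theorem pvMain (n m : Int) : ∀ (fuel : Nat) (cl : List (List Char × List Char)) (lstR : List Char) (i : Int)
    (bounds : List Int),
    pvRel cl lstR bounds →
    ¬ pvBreakA cl →
    circleLoopA n m fuel cl lstR (lstR.length : Int) i = circleOuterB n m fuel bounds (lstR.length : Int) i := by
  intro fuel
  induction fuel with
  | zero =>
    intro cl lstR i bounds hrel hbr
    obtain ⟨hR, hf, hl, hcur⟩ := hrel
    rw [circleOuterB_eq, if_neg ((not_iff_not.mpr (pvStop_iff cl bounds hf hl)).mp hbr)]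
    simpa [circleLoopA, nextBoundaryB] using hf
  | succ f ih =>
    intro cl lstR i bounds hrel hbr
    obtain ⟨hR, hf, hl, hcur⟩ := hrel
    have hbrR : ¬ (2 ≤ cl.length ∧ (cl.headD ([], [])).1.headD ' ' = (cl.getLast?.getD ([], [])).2.headD ' ') := hbr
    have hstop : ¬ (2 ≤ bounds.length ∧ PySem.Str.endswith (PySem.Int.toStr (bounds.getLastD 0)) "1" = true) :=
      (not_iff_not.mpr (pvStop_iff cl bounds hf hl)).mp hbr
    have hs : PySem.Int.toChars (i + 1) ≠ [] := pvToChars_ne_nil (i + 1)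
    simp only [circleLoopA]
    rw [circleOuterB_eq, if_neg hstop]
    by_cases hr : PySem.Int.mod ((lstR.length : Int) + ((PySem.Int.toChars (i + 1)).length : Int)) m = 0
    case pos =>
      -- a chunk completes: A appends the chunk string, B appends the boundary number i+1
      rw [if_pos hr]
      simp only [nextBoundaryB]
      rw [if_pos hr]
      set s := PySem.Int.toChars (i + 1) with hsdef
      set i2 := if i + 1 = n then 0 else i + 1 with hi2
      -- the chunk string in forward order
      have hchunk : (s.reverse ++ lstR).reverse = lstR.reverse ++ s := by
        simp
      -- its first char is the current chunk's first digit
      have hhd : (lstR.reverse ++ s).headD ' ' = lstR.getLastD ' ' := by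
        cases hlr : lstR.reverse with
        | nil => simp at hlr; exact absurd hlr hR
        | cons a t =>
          have : lstR.getLast? = some a := by rw [← List.head?_reverse, hlr]; rfl
          simp [List.getLastD_eq_getLast?, this]
      -- its last char is str(i+1)'s last char
      have htl : (s.reverse ++ lstR).headD ' ' = s.getLastD ' ' := by
        cases hcs : s.reverse with
        | nil => simp at hcs; exact absurd hcs hs
        | cons a t =>
          have : s.getLast? = some a := by rw [← List.head?_reverse, hcs]; rfl
          simp [List.getLastD_eq_getLast?, this]
      -- the new simulation relation
      have hf' : (cl ++ [((s.reverse ++ lstR).reverse, s.reverse ++ lstR)]).map (fun c => String.ofList [c.1.headD ' '])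
          = pvSoFarB (bounds ++ [i + 1]) := by
        rw [hchunk]
        simp only [List.map_append, List.map_cons, List.map_nil, hhd, hcur]
        rw [hf]
        exact pvSoFar_snoc bounds (i + 1)
      have hl' : (cl ++ [((s.reverse ++ lstR).reverse, s.reverse ++ lstR)]).getLast?.map (fun c => c.2.headD ' ')
          = (bounds ++ [i + 1]).getLast?.map (fun b => (PySem.Int.toChars b).getLastD ' ') := by
        rw [show (cl ++ [((s.reverse ++ lstR).reverse, s.reverse ++ lstR)]).getLast?
              = some ((s.reverse ++ lstR).reverse, s.reverse ++ lstR) from List.getLast?_concat,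
          show (bounds ++ [i + 1]).getLast? = some (i + 1) from List.getLast?_concat]
        simp only [Option.map_some, Option.some.injEq]
        rw [htl, hsdef]
      have hcur' : s.reverse.getLastD ' ' = pvCurFirst (bounds ++ [i + 1]) := by
        cases hcs : s with
        | nil => exact absurd hcs hs
        | cons a t =>
          simp [pvCurFirst, List.getLastD_eq_getLast?, List.getLast?_reverse, hcs, ← hsdef]
      have hrel' : pvRel (cl ++ [((s.reverse ++ lstR).reverse, s.reverse ++ lstR)]) s.reverse (bounds ++ [i + 1]) :=
        ⟨by simpa using hs, hf', hl', hcur'⟩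
      by_cases hbr' : pvBreakA (cl ++ [((s.reverse ++ lstR).reverse, s.reverse ++ lstR)])
      case pos =>
        -- both terminate now and return the collected first digits
        have hbr'R : 2 ≤ (cl ++ [((s.reverse ++ lstR).reverse, s.reverse ++ lstR)]).length ∧
            ((cl ++ [((s.reverse ++ lstR).reverse, s.reverse ++ lstR)]).headD ([], [])).1.headD ' '
              = ((cl ++ [((s.reverse ++ lstR).reverse, s.reverse ++ lstR)]).getLast?.getD ([], [])).2.headD ' ' := hbr'
        rw [if_pos hbr'R]
        have hstop' := (pvStop_iff _ _ hf' hl').mp hbr'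
        change _ = circleOuterB n m f (bounds ++ [i + 1]) (s.length : Int) i2
        rw [circleOuterB_eq, if_pos hstop', hf']
        simp [pvSoFarB, pvFinishB]
      case neg =>
        have hbr'R : ¬ (2 ≤ (cl ++ [((s.reverse ++ lstR).reverse, s.reverse ++ lstR)]).length ∧
            ((cl ++ [((s.reverse ++ lstR).reverse, s.reverse ++ lstR)]).headD ([], [])).1.headD ' '
              = ((cl ++ [((s.reverse ++ lstR).reverse, s.reverse ++ lstR)]).getLast?.getD ([], [])).2.headD ' ') := hbr'
        rw [if_neg hbr'R]
        change circleLoopA n m f (cl ++ [((s.reverse ++ lstR).reverse, s.reverse ++ lstR)]) s.reverse (s.length : Int) i2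
          = circleOuterB n m f (bounds ++ [i + 1]) (s.length : Int) i2
        have := ih (cl ++ [((s.reverse ++ lstR).reverse, s.reverse ++ lstR)]) s.reverse i2 (bounds ++ [i + 1]) hrel' hbr'
        simpa using this
    case neg =>
      -- no chunk completes: A grows lst, B's inner helper keeps scanning with the same bounds
      rw [if_neg hr, if_neg hbrR]
      rw [nextBoundaryB_step n m f i (lstR.length : Int) hr]
      have houter : circleOuterB n m f bounds
            ((lstR.length : Int) + ((PySem.Int.toChars (i + 1)).length : Int))
            (if i + 1 = n then 0 else i + 1)
          = (match nextBoundaryB n m f (if i + 1 = n then 0 else i + 1)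
              ((lstR.length : Int) + ((PySem.Int.toChars (i + 1)).length : Int)) with
            | none => pvSoFarB bounds
            | some (c, d, i2, f') => circleOuterB n m f' (bounds ++ [c]) d i2) := by
        rw [circleOuterB_eq, if_neg hstop]
      rw [← houter]
      have hrel' : pvRel cl ((PySem.Int.toChars (i + 1)).reverse ++ lstR) bounds := by
        refine ⟨by simp [hR], hf, hl, ?_⟩
        rw [List.getLastD_eq_getLast?, List.getLast?_append_of_ne_nil _ hR,
          ← List.getLastD_eq_getLast?, hcur]
      have := ih cl ((PySem.Int.toChars (i + 1)).reverse ++ lstR) (if i + 1 = n then 0 else i + 1)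
        bounds hrel' hbr
      simp only [List.length_append, List.length_reverse, Nat.cast_add] at this
      rw [Int.add_comm (((PySem.Int.toChars (i + 1)).length : Nat) : Int) ((lstR.length : Nat) : Int)] at this
      exact this

-- ===== VERDICT (by name: the statement is the Claim_ definition above) =====
theorem circle_array_spec : Claim_equal_circle_array := by
  intro n m _ hpre
  unfold Spec_circle_array circle_array circle_array_alt
  rw [if_neg hpre, if_neg hpre]
  have := pvMain n m (pvFuel n m) [] ['1'] 1 []
    ⟨by simp, by simp [pvSoFarB], by simp, by simp [pvCurFirst]⟩
    (by simp [pvBreakA])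
  simpa using this
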